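-- pv_equiv track=rewrite | github.com/dvillano2/z3_points | structures.py | non_flat_lines_through_origin
-- ===== SOURCE A (Python) =====
-- from typing import List
--
-- def non_flat_lines_through_origin(prime: int) -> List[List[List[int]]]:
--     stereo_directions = [[[0] for _ in range(prime)] for _ in range(prime)]
--     for x in range(prime):
--         for y in range(prime):
--             stereo_directions[y][x] = [
--                 ((t * x) % prime + ((t * y) % prime) * prime + t * prime**2)
--                 for t in range(prime)
--             ]
--     return stereo_directions
-- ===== SOURCE B (Python) =====
-- def non_flat_lines_through_origin(prime):
--     # Phase 1: p x p table of modular products, each row built by an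
--     # additive chain (acc = (acc + a) % prime) instead of per-entry t*a % prime.
--     mult = []
--     for a in range(prime):
--         row = []
--         acc = 0
--         for _ in range(prime):
--             row.append(acc)
--             acc = (acc + a) % prime
--         mult.append(row)
--     # Phase 2: assemble by iterating over the table rows directly.
--     p2 = prime * prime
--     return [[[mx + my * prime + t * p2
--               for t, (mx, my) in enumerate(zip(row_x, row_y))]
--              for row_x in mult]
--             for row_y in mult]
-- ===== Notes on version B (the rewrite author's own statement) =====
-- stated objective: alternative
-- what changed: Replaces the fused triple loop over a preallocated p×p array mutated in place by a two-phase build: a p×p table of modular products generated by additive chains (acc = (acc + a) % prime, no per-entry multiplication or mod of t*a), then an assembly pass that iterates over table rows with zip/enumerate instead of indexing.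
import Mathlib
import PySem

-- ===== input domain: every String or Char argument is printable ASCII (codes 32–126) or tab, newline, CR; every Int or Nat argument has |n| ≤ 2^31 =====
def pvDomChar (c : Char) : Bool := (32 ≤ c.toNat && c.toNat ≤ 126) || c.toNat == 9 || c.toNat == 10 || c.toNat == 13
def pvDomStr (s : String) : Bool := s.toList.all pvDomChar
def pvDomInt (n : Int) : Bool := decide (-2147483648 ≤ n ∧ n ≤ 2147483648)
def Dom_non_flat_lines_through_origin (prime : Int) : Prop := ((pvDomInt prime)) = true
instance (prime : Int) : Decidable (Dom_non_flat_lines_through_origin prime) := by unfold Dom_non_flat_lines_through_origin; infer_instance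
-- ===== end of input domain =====

-- B builds a p×p table of modular products by additive chains and assembles the
-- result by iterating over table rows (zip/enumerate), instead of A's fused triple
-- loop mutating a preallocated array in place (objective: alternative decomposition).


-- ===== PORT A =====
def non_flat_lines_through_origin (prime : Int) : List (List (List Int)) :=
  let init : List (List (List Int)) :=
    (PySem.List.pyRange 0 prime 1).map (fun _ =>
      (PySem.List.pyRange 0 prime 1).map (fun _ => ([0] : List Int)))
  (PySem.List.pyRange 0 prime 1).foldl (fun sd x =>
    (PySem.List.pyRange 0 prime 1).foldl (fun sd y =>
      -- stereo_directions[y][x] = [...]  (y, x always in range)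
      PySem.List.pySetD sd y
        (PySem.List.pySetD (PySem.List.pyGetD sd y []) x
          ((PySem.List.pyRange 0 prime 1).map (fun t =>
            PySem.Int.mod (t * x) prime + (PySem.Int.mod (t * y) prime) * prime + t * prime ^ 2)))) sd) init

-- ===== PORT B =====
-- additive-chain row:  row.append(acc); acc = (acc + a) % prime
def pvMultRow (prime a : Int) : List Int :=
  ((PySem.List.pyRange 0 prime 1).foldl
    (fun (s : List Int × Int) _ => (s.1 ++ [s.2], PySem.Int.mod (s.2 + a) prime))
    (([] : List Int), 0)).1

def non_flat_lines_through_origin_alt (prime : Int) : List (List (List Int)) :=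
  let mult : List (List Int) :=
    (PySem.List.pyRange 0 prime 1).foldl (fun m a => m ++ [pvMultRow prime a]) []
  let p2 := prime * prime
  mult.map (fun rowY => mult.map (fun rowX =>
    (PySem.List.enumerate (rowX.zip rowY) 0).map (fun tm =>
      tm.2.1 + tm.2.2 * prime + tm.1 * p2)))

-- ===== PRECONDITION & SPEC =====
def Spec_non_flat_lines_through_origin (prime : Int) (out : List (List (List Int))) : Prop := out = non_flat_lines_through_origin_alt prime
instance (prime : Int) (out : List (List (List Int))) : Decidable (Spec_non_flat_lines_through_origin prime out) := by unfold Spec_non_flat_lines_through_origin; infer_instance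

-- ===== CLAIM (what is proved, stated in full; the proofs are below) =====
def Claim_equal_non_flat_lines_through_origin : Prop := ∀ (prime : Int), Dom_non_flat_lines_through_origin prime → Spec_non_flat_lines_through_origin prime (non_flat_lines_through_origin prime)

-- ===== LEMMAS AND PROOFS =====

-- the common target value
def pvLine (p x y : Int) : List Int :=
  (List.range p.toNat).map (fun t : Nat =>
    PySem.Int.mod ((t : Int) * x) p + (PySem.Int.mod ((t : Int) * y) p) * p + (t : Int) * (p * p))

def pvTarget (p : Int) : List (List (List Int)) :=
  (List.range p.toNat).map (fun y : Nat => (List.range p.toNat).map (fun x : Nat => pvLine p (x : Int) (y : Int)))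

-- generic index-set fold lemmas ------------------------------------------------

theorem pv_skip {a : Type} (F : a -> Nat -> a) (dflt : a) :
    forall (js : List Nat) (d : List a) (j : Nat), j ∉ js ->
      (js.foldl (fun d j => d.set j (F (d.getD j dflt) j)) d)[j]? = d[j]? := by
  intro js
  induction js with
  | nil => intro d j _; rfl
  | cons k js ih =>
    intro d j hj
    simp only [List.mem_cons, not_or] at hj
    simp only [List.foldl_cons]
    rw [ih _ _ hj.2, List.getElem?_set_ne (fun h => hj.1 h.symm)]

theorem pv_get {a : Type} (F : a -> Nat -> a) (dflt : a) :
    forall (js : List Nat) (d : List a) (j : Nat), js.Nodup -> j ∈ js ->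
      (js.foldl (fun d j => d.set j (F (d.getD j dflt) j)) d)[j]? = d[j]?.map (fun v => F v j) := by
  intro js
  induction js with
  | nil => intro d j _ h; cases h
  | cons k js ih =>
    intro d j hnd hj
    simp only [List.nodup_cons] at hnd
    simp only [List.foldl_cons]
    rcases List.mem_cons.mp hj with h | h
    · subst h
      rw [pv_skip F dflt js _ j hnd.1, List.getElem?_set_self']
      cases heq : d[j]? with
      | none => simp
      | some v => simp [heq]
    · have hkj : k ≠ j := fun he => hnd.1 (he ▸ h)
      rw [ih _ _ hnd.2 h, List.getElem?_set_ne hkj]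

theorem pv_range {a : Type} (F : a -> Nat -> a) (dflt : a) (d : List a) :
    (List.range d.length).foldl (fun d j => d.set j (F (d.getD j dflt) j)) d
      = d.mapIdx (fun j v => F v j) := by
  apply List.ext_getElem?
  intro j
  by_cases hj : j < d.length
  · rw [pv_get F dflt _ _ _ List.nodup_range (List.mem_range.mpr hj), List.getElem?_mapIdx]
  · rw [pv_skip F dflt _ _ _ (fun h => hj (List.mem_range.mp h)), List.getElem?_mapIdx]
    have h1 : d[j]? = none := List.getElem?_eq_none (by omega)
    simp [h1]

theorem pv_outer {a : Type} (H : Nat -> a -> Nat -> a) (dflt : a) (n : Nat) :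
    forall (xs : List Nat) (d : List a), d.length = n -> forall (j : Nat),
      (xs.foldl (fun d i => (List.range n).foldl (fun d k => d.set k (H i (d.getD k dflt) k)) d) d)[j]?
        = d[j]?.map (fun r => xs.foldl (fun r i => H i r j) r) := by
  intro xs
  induction xs with
  | nil => intro d _ j; simp
  | cons i xs ih =>
    intro d hd j
    simp only [List.foldl_cons]
    have hin : (List.range n).foldl (fun d k => d.set k (H i (d.getD k dflt) k)) d
        = d.mapIdx (fun j v => H i v j) := by
      rw [← hd]; exact pv_range (H i) dflt d
    rw [hin, ih _ (by simp [hd]) j, List.getElem?_mapIdx]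
    cases d[j]? <;> rfl

theorem pv_mapIdx_const {b c : Type} (n : Nat) (c0 : b) (g : Nat -> c) :
    List.mapIdx (fun i _ => g i) ((List.range n).map (fun _ => c0)) = (List.range n).map g := by
  apply List.ext_getElem <;> simp

-- A equals the target --------------------------------------------------------

theorem a_eq_target (p : Int) :
    non_flat_lines_through_origin p = pvTarget p := by
  by_cases hp : 0 < p
  · unfold non_flat_lines_through_origin pvTarget
    rw [PySem.List.pyRange_one]
    simp only [sub_zero, List.foldl_map, List.map_map, Function.comp_def, zero_add,
      PySem.List.pySetD_natCast, PySem.List.pyGetD_natCast]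
    have key := pv_outer
      (fun i (r : List (List Int)) k =>
        r.set i (List.map (fun t : Nat => PySem.Int.mod ((t : Int) * (i : Int)) p
          + PySem.Int.mod ((t : Int) * (k : Int)) p * p + (t : Int) * p ^ 2) (List.range p.toNat)))
      ([] : List (List Int)) p.toNat (List.range p.toNat)
      (List.map (fun _ : Nat => List.map (fun _ : Nat => ([0] : List Int)) (List.range p.toNat)) (List.range p.toNat))
      (by simp)
    apply List.ext_getElem?
    intro j
    rw [key j]
    by_cases hj : j < p.toNat
    · simp only [List.getElem?_map, List.getElem?_range hj, Option.map_some]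
      congr 1
      have hr := pv_range
        (fun (_ : List Int) i =>
          List.map (fun t : Nat => PySem.Int.mod ((t : Int) * (i : Int)) p
            + PySem.Int.mod ((t : Int) * (j : Int)) p * p + (t : Int) * p ^ 2) (List.range p.toNat))
        ([] : List Int)
        (List.map (fun _ : Nat => ([0] : List Int)) (List.range p.toNat))
      simp only [List.length_map, List.length_range] at hr
      rw [hr, pv_mapIdx_const]
      simp [pvLine, pow_two]
    · have hj' : p.toNat ≤ j := by omega
      rw [List.getElem?_eq_none (by simpa using hj'), List.getElem?_eq_none (by simpa using hj')]
      rfl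
  · unfold non_flat_lines_through_origin pvTarget
    rw [PySem.List.pyRange_one_eq_nil (by omega)]
    simp [show p.toNat = 0 by omega]

-- B equals the target --------------------------------------------------------

theorem pv_chain (p a : Int) (hp : 0 < p) :
    forall (k : Nat),
      (List.range k).foldl (fun (s : List Int × Int) _ => (s.1 ++ [s.2], PySem.Int.mod (s.2 + a) p)) (([] : List Int), 0)
        = ((List.range k).map (fun t : Nat => PySem.Int.mod ((t : Int) * a) p), PySem.Int.mod ((k : Int) * a) p) := by
  intro k
  induction k with
  | zero => simp [PySem.Int.mod_eq_emod_of_pos hp]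
  | succ k ih =>
    rw [List.range_succ, List.foldl_append, ih]
    simp only [List.foldl_cons, List.foldl_nil]
    refine Prod.ext ?_ ?_
    · simp
    · simp only [PySem.Int.mod_eq_emod_of_pos hp, Int.emod_add_emod]
      congr 1
      push_cast
      ring

theorem pvMultRow_eq (p a : Int) (hp : 0 < p) :
    pvMultRow p a = (List.range p.toNat).map (fun t : Nat => PySem.Int.mod ((t : Int) * a) p) := by
  unfold pvMultRow
  rw [PySem.List.pyRange_one, List.foldl_map]
  simp only [sub_zero]
  rw [pv_chain p a hp]

theorem pv_app {i b : Type} (g : i -> b) :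
    forall (l : List i) (init : List b),
      l.foldl (fun m x => m ++ [g x]) init = init ++ l.map g := by
  intro l
  induction l with
  | nil => simp
  | cons x l ih => intro init; simp [ih]

theorem pv_enum {b c : Type} (q : b -> c) :
    forall (l : List b) (s : Int),
      PySem.List.enumerate (l.map q) s = (PySem.List.enumerate l s).map (fun t => (t.1, q t.2)) := by
  intro l
  induction l with
  | nil => intro s; rfl
  | cons x l ih => intro s; simp [PySem.List.enumerate_cons, ih]

theorem pv_enum_range :
    forall (n : Nat), PySem.List.enumerate (List.range n) 0 = (List.range n).map (fun k : Nat => ((k : Int), k)) := by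
  intro n
  induction n with
  | zero => rfl
  | succ n ih =>
    rw [List.range_succ, PySem.List.enumerate_append, ih]
    simp [PySem.List.enumerate_cons]

theorem b_eq_target (p : Int) :
    non_flat_lines_through_origin_alt p = pvTarget p := by
  by_cases hp : 0 < p
  · have hrow : forall a, pvMultRow p a
        = (List.range p.toNat).map (fun t : Nat => PySem.Int.mod ((t : Int) * a) p) :=
      fun a => pvMultRow_eq p a hp
    unfold non_flat_lines_through_origin_alt pvTarget pvLine
    rw [PySem.List.pyRange_one]
    simp only [sub_zero, List.foldl_map, pv_app, List.nil_append, List.map_map,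
      Function.comp_def, zero_add, hrow, List.zip_map', pv_enum, pv_enum_range]
  · have h0 : p.toNat = 0 := by omega
    unfold non_flat_lines_through_origin_alt pvTarget
    rw [PySem.List.pyRange_one_eq_nil (by omega)]
    simp [h0]
-- ===== VERDICT (by name: the statement is the Claim_ definition above) =====
theorem non_flat_lines_through_origin_spec : Claim_equal_non_flat_lines_through_origin := by
  intro p _
  unfold Spec_non_flat_lines_through_origin
  rw [a_eq_target, b_eq_target]
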